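-- pv_equiv track=rewrite | github.com/Gary9409/Algorithm | 2023-11-01/나무_자르기.py | solution
-- ===== SOURCE A (Python) =====
-- def solution(trees, l):
--     lo, hi = 0, max(trees)
--     while lo < hi:
--         mid = 1 + lo + (hi - lo) // 2
--         # if sum(max(0, tree - mid) for tree in trees) < l:
--         if sum(tree - mid for tree in trees if tree - mid > 0) < l:
--             hi = mid - 1
--         else:
--             lo = mid
--
--     return hi
-- ===== SOURCE B (Python) =====
-- def solution(trees, l):
--     m = max(trees)
--     if m <= 0 or l <= 0:
--         return m
--     ts = sorted((t for t in trees if t > 0), reverse=True)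
--     s = 0
--     n = len(ts)
--     for k in range(1, n + 1):
--         t = ts[k - 1]
--         s += t
--         low = ts[k] if k < n else 0
--         cand = min((s - l) // k, t - 1)
--         if low <= cand:
--             return cand
--     return 0
-- ===== Notes on version B (the rewrite author's own statement) =====
-- stated objective: faster
-- what changed: replaces the O(n log M) binary search over cut heights by a single descending scan over the sorted positive heights with a running prefix sum, solving each linear segment in closed form with one floor division
import Mathlib
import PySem

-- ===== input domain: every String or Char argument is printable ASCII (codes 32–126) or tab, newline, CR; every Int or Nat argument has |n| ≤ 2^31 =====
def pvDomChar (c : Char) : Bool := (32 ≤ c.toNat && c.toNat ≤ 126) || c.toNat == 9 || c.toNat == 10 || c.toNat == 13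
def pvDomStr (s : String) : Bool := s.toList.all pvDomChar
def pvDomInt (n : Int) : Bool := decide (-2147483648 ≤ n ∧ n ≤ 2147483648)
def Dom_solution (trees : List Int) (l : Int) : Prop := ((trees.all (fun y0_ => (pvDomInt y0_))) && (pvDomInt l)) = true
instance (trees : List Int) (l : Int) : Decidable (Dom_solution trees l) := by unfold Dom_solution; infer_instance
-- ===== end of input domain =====

-- B replaces A's binary search over cut heights by one descending scan over the sorted
-- positive heights with a running prefix sum, solving each linear segment in closed form.

-- ===== PORT A =====
-- sum(tree - mid for tree in trees if tree - mid > 0)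
def woodA (trees : List Int) (mid : Int) : Int :=
  trees.foldl (fun s t => if t - mid > 0 then s + (t - mid) else s) 0

-- the while-loop of A (mid written out at each occurrence)
def aloop (trees : List Int) (l lo hi : Int) : Int :=
  if h : lo < hi then
    if woodA trees (1 + lo + PySem.Int.floordiv (hi - lo) 2) < l then
      aloop trees l lo ((1 + lo + PySem.Int.floordiv (hi - lo) 2) - 1)
    else
      aloop trees l (1 + lo + PySem.Int.floordiv (hi - lo) 2) hi
  else hi
termination_by (hi - lo).toNat
decreasing_by
  · have := PySem.Int.floordiv_eq_ediv_of_pos (a := hi - lo) (b := 2) (by omega)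
    omega
  · have := PySem.Int.floordiv_eq_ediv_of_pos (a := hi - lo) (b := 2) (by omega)
    omega

def solution (trees : List Int) (l : Int) : Int :=
  match PySem.List.max? trees (fun x => x) with
  | none => 0          -- max([]) raises in Python; excluded by Pre_solution
  | some m => aloop trees l 0 m

-- ===== PORT B =====
-- the for-loop of Source B: rest = ts[k:], k trees already consumed, s their sum
def bloop (l : Int) : List Int → Int → Int → Int
  | [], _, _ => 0
  | t :: rest, k, s =>
      let s' := s + t
      let k' := k + 1
      let low := match rest with | [] => 0 | t2 :: _ => t2
      let cand := min (PySem.Int.floordiv (s' - l) k') (t - 1)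
      if low ≤ cand then cand else bloop l rest k' s'

def solution_alt (trees : List Int) (l : Int) : Int :=
  match PySem.List.max? trees (fun x => x) with
  | none => 0          -- max([]) raises in Python; excluded by Pre_solution
  | some m =>
    if m ≤ 0 ∨ l ≤ 0 then m
    else bloop l (PySem.List.sorted (trees.filter (fun t => decide (0 < t))) (fun x => x) true) 0 0

-- ===== PRECONDITION & SPEC =====
-- A raises ValueError on the empty list (max([])); that is the only exception.
def Pre_solution (trees : List Int) (l : Int) : Prop := trees ≠ []
instance (trees : List Int) (l : Int) : Decidable (Pre_solution trees l) := by
  unfold Pre_solution; infer_instance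

def pvWitness_solution : List Int × Int := ([20, 15, 10, 17], 7)

def Spec_solution (trees : List Int) (l : Int) (out : Int) : Prop := out = solution_alt trees l
instance (trees : List Int) (l : Int) (out : Int) : Decidable (Spec_solution trees l out) := by
  unfold Spec_solution; infer_instance

-- ===== CLAIM (what is proved, stated in full; the proofs are below) =====
def Claim_equal_solution : Prop := ∀ (trees : List Int) (l : Int), Dom_solution trees l → Pre_solution trees l → Spec_solution trees l (solution trees l)

-- ===== LEMMAS AND PROOFS =====

-- total wood cut at height h, as a filtered-map sum
def woodS (xs : List Int) (h : Int) : Int :=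
  ((xs.filter (fun t => decide (h < t))).map (fun t => t - h)).sum

lemma woodS_cons (x : Int) (xs : List Int) (h : Int) :
    woodS (x :: xs) h = (if h < x then x - h else 0) + woodS xs h := by
  by_cases hx : h < x
  · simp [woodS, hx]
  · simp [woodS, hx]

lemma woodA_eq_woodS (trees : List Int) (h : Int) : woodA trees h = woodS trees h := by
  suffices H : ∀ c, trees.foldl (fun s t => if t - h > 0 then s + (t - h) else s) c
      = c + woodS trees h by
    simpa [woodA] using H 0
  induction trees with
  | nil => intro c; simp [woodS]
  | cons x xs ih =>
    intro c
    rw [List.foldl_cons, ih, woodS_cons]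
    by_cases hx : h < x
    · rw [if_pos (by omega), if_pos hx]; ring
    · rw [if_neg (by omega), if_neg hx]; ring

lemma woodS_antitone (xs : List Int) {h h' : Int} (hh : h ≤ h') :
    woodS xs h' ≤ woodS xs h := by
  induction xs with
  | nil => simp [woodS]
  | cons x t ih =>
    rw [woodS_cons, woodS_cons]
    have : (if h' < x then x - h' else 0) ≤ (if h < x then x - h else 0) := by
      split_ifs <;> omega
    omega

-- at a nonnegative height, trees ≤ 0 contribute nothing
lemma woodS_filter_pos (xs : List Int) (h : Int) (hh : 0 ≤ h) :
    woodS (xs.filter (fun t => decide (0 < t))) h = woodS xs h := by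
  unfold woodS
  rw [List.filter_filter]
  congr 2
  apply List.filter_congr
  intro x _
  by_cases hx : h < x <;> simp [hx] <;> omega

lemma woodS_perm {xs ys : List Int} (p : xs.Perm ys) (h : Int) : woodS xs h = woodS ys h :=
  List.Perm.sum_eq (List.Perm.map _ (List.Perm.filter _ p))

lemma sum_map_sub (xs : List Int) (h : Int) :
    (xs.map (fun t => t - h)).sum = xs.sum - xs.length * h := by
  induction xs with
  | nil => simp
  | cons x t ih => simp [ih]; ring

-- the characterisation both ports satisfy when m = max(trees) > 0
def CharBS (trees : List Int) (l m r : Int) : Prop :=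
  0 ≤ r ∧ r ≤ m ∧ (0 < r → l ≤ woodS trees r) ∧ ∀ h, r < h → h ≤ m → woodS trees h < l

lemma charBS_unique {trees : List Int} {l m r₁ r₂ : Int}
    (h₁ : CharBS trees l m r₁) (h₂ : CharBS trees l m r₂) : r₁ = r₂ := by
  obtain ⟨a1, b1, c1, d1⟩ := h₁
  obtain ⟨a2, b2, c2, d2⟩ := h₂
  by_contra hne
  rcases lt_or_gt_of_ne hne with hlt | hgt
  · exact absurd (c2 (by omega)) (not_le.mpr (d1 r₂ hlt b2))
  · exact absurd (c1 (by omega)) (not_le.mpr (d2 r₁ hgt b1))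

-- A's loop meets the characterisation
lemma aloop_char (trees : List Int) (l m : Int) :
    ∀ n lo hi, (hi - lo).toNat = n → 0 ≤ lo → lo ≤ hi → hi ≤ m →
    (0 < lo → l ≤ woodS trees lo) → (∀ h, hi < h → h ≤ m → woodS trees h < l) →
    CharBS trees l m (aloop trees l lo hi) := by
  intro n
  induction n using Nat.strong_induction_on with
  | _ n ih =>
    intro lo hi hn hlo hlohi hhim hvalid hinval
    rw [aloop]
    by_cases hlt : lo < hi
    · rw [dif_pos hlt]
      have h2 : PySem.Int.floordiv (hi - lo) 2 = (hi - lo) / 2 :=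
        PySem.Int.floordiv_eq_ediv_of_pos (by omega)
      set mid := 1 + lo + PySem.Int.floordiv (hi - lo) 2 with hmid
      have hmb : lo < mid ∧ mid ≤ hi := by rw [hmid, h2]; omega
      rw [woodA_eq_woodS]
      by_cases hc : woodS trees mid < l
      · rw [if_pos hc]
        refine ih (mid - 1 - lo).toNat (by omega) lo (mid - 1) rfl hlo (by omega) (by omega)
          hvalid ?_
        intro h hh1 hh2
        by_cases hhl : h ≤ hi
        · exact lt_of_le_of_lt (woodS_antitone trees (by omega)) hc
        · exact hinval h (by omega) hh2
      · rw [if_neg hc]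
        exact ih (hi - mid).toNat (by omega) mid hi rfl (by omega) (by omega) hhim
          (fun _ => le_of_not_gt hc) hinval
    · rw [dif_neg hlt]
      have heq : lo = hi := le_antisymm hlohi (le_of_not_gt hlt)
      exact ⟨by omega, by omega, heq ▸ hvalid, hinval⟩

-- B's loop meets the characterisation
lemma woodS_nonneg (xs : List Int) (h : Int) : 0 ≤ woodS xs h := by
  induction xs with
  | nil => simp [woodS]
  | cons x t ih =>
    rw [woodS_cons]
    have : (0:Int) ≤ if h < x then x - h else 0 := by split_ifs <;> omega
    omega

lemma woodS_eq_zero (xs : List Int) (h : Int) (hall : ∀ x ∈ xs, x ≤ h) : woodS xs h = 0 := by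
  unfold woodS
  rw [List.filter_eq_nil_iff.mpr (by intro y hy; simpa using not_lt.mpr (hall y hy))]
  simp

-- the lower edge of the current segment / the bound below which nothing is checked yet
def lowOf : List Int → Int
  | [] => 0
  | t2 :: _ => t2

def bndOf : List Int → Int
  | [] => -1
  | t :: _ => t - 1

lemma bndOf_eq_lowOf_sub_one (xs : List Int) : bndOf xs = lowOf xs - 1 := by
  cases xs <;> simp [bndOf, lowOf]

-- wood on a linear segment: pre ++ [t] are the trees above h, rest' is below
lemma woodS_segment (pre rest' : List Int) (t h : Int)
    (hsort : (pre ++ t :: rest').Pairwise (fun a b => b ≤ a))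
    (hrest : ∀ y ∈ rest', y ≤ h) (ht : h < t) :
    woodS (pre ++ t :: rest') h = (pre.sum + t) - ((pre.length : Int) + 1) * h := by
  have hpre : ∀ x ∈ pre, h < x := by
    intro x hx
    have := (List.pairwise_append.mp hsort).2.2 x hx t (by simp)
    omega
  unfold woodS
  rw [List.filter_append, List.filter_eq_self.mpr (by intro x hx; simpa using hpre x hx),
      List.filter_cons_of_pos (by simpa using ht),
      List.filter_eq_nil_iff.mpr (by intro y hy; simpa using not_lt.mpr (hrest y hy)),
      List.map_append, List.sum_append, sum_map_sub]
  simp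
  ring

lemma woodS_trees_full {trees full : List Int}
    (hperm : full.Perm (trees.filter (fun t => decide (0 < t)))) (h : Int) (hh : 0 ≤ h) :
    woodS trees h = woodS full h := by
  rw [woodS_perm hperm, woodS_filter_pos _ _ hh]

lemma bloop_char (trees : List Int) (l m : Int) (hm : 0 < m)
    (full : List Int) (hperm : full.Perm (trees.filter (fun t => decide (0 < t))))
    (hsort : full.Pairwise (fun a b => b ≤ a)) (hpos : ∀ x ∈ full, 0 < x)
    (hle : ∀ x ∈ full, x ≤ m) :
    ∀ rest pre, full = pre ++ rest →
    (∀ h, bndOf rest < h → h ≤ m → woodS trees h < l) →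
    CharBS trees l m (bloop l rest (pre.length : Int) pre.sum) := by
  intro rest
  induction rest with
  | nil =>
    intro pre _ hinv
    show CharBS trees l m 0
    exact ⟨le_refl 0, by omega, fun h => absurd h (by omega),
      fun h h1 h2 => hinv h (show bndOf [] < h by simp only [bndOf]; omega) h2⟩
  | cons t rest' ih =>
    intro pre hfull hinv
    have htm : t ≤ m := hle t (by rw [hfull]; simp)
    have htpos : 0 < t := hpos t (by rw [hfull]; simp)
    have hsort' : (pre ++ t :: rest').Pairwise (fun a b => b ≤ a) := hfull ▸ hsort
    have hrest_le : ∀ y ∈ rest', y ≤ lowOf rest' := by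
      intro y hy
      have hp : (t :: rest').Pairwise (fun a b => b ≤ a) :=
        (List.pairwise_append.mp hsort').2.1
      have hp' : rest'.Pairwise (fun a b => b ≤ a) := (List.pairwise_cons.mp hp).2
      match rest', hy, hp' with
      | t2 :: tl, hy, hp' =>
        rcases List.mem_cons.mp hy with hy | hy
        · simp [lowOf, hy]
        · exact (List.pairwise_cons.mp hp').1 y hy
    have hlow_nonneg : (0:Int) ≤ lowOf rest' := by
      match rest' with
      | [] => exact le_refl 0
      | t2 :: tl => exact le_of_lt (hpos t2 (by rw [hfull]; simp [lowOf]))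
    show CharBS trees l m
      (if lowOf rest' ≤
          min (PySem.Int.floordiv (((pre.sum : Int) + t) - l) ((pre.length : Int) + 1)) (t - 1)
        then min (PySem.Int.floordiv (((pre.sum : Int) + t) - l) ((pre.length : Int) + 1)) (t - 1)
        else bloop l rest' ((pre.length : Int) + 1) ((pre.sum : Int) + t))
    set S' : Int := (pre.sum : Int) + t with hS
    set K' : Int := (pre.length : Int) + 1 with hK
    have hK0 : 0 < K' := by rw [hK]; positivity
    set cand := min (PySem.Int.floordiv (S' - l) K') (t - 1) with hcand
    have hseg : ∀ h, lowOf rest' ≤ h → h < t → woodS trees h = S' - K' * h := by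
      intro h h1 h2
      rw [woodS_trees_full hperm h (by omega), hfull,
          woodS_segment pre rest' t h hsort' (fun y hy => le_trans (hrest_le y hy) h1) h2]
    have hbndc : bndOf (t :: rest') = t - 1 := rfl
    by_cases hbr : lowOf rest' ≤ cand
    · rw [if_pos hbr]
      have hcf : cand * K' ≤ S' - l :=
        (PySem.Int.le_floordiv_iff_mul_le hK0).mp (min_le_left _ _)
      have hct : cand ≤ t - 1 := min_le_right _ _
      refine ⟨by omega, by omega, ?_, ?_⟩
      · intro _
        rw [hseg cand hbr (by omega)]
        nlinarith [mul_comm cand K']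
      · intro h h1 h2
        by_cases hht : h ≤ t - 1
        · have hfd : PySem.Int.floordiv (S' - l) K' < h := by
            rcases min_lt_iff.mp (lt_of_le_of_lt (le_refl cand) h1) with hc | hc
            · exact hc
            · omega
          have := (PySem.Int.floordiv_lt_iff_lt_mul hK0).mp hfd
          rw [hseg h (by omega) (by omega)]
          nlinarith [mul_comm h K']
        · exact hinv h (by rw [hbndc]; omega) h2
    · rw [if_neg hbr]
      have hlen : ((pre ++ [t]).length : Int) = K' := by simp [hK]
      have hsum : (pre ++ [t]).sum = S' := by simp [hS]
      have hrec := ih (pre ++ [t]) (by rw [hfull]; simp) ?_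
      · rwa [hlen, hsum] at hrec
      · intro h h1 h2
        have hlow_le : lowOf rest' ≤ h := by
          rw [bndOf_eq_lowOf_sub_one] at h1; omega
        by_cases hht : h ≤ t - 1
        · have hfd : PySem.Int.floordiv (S' - l) K' < h := by
            have hcl : cand < lowOf rest' := by omega
            rcases min_lt_iff.mp (lt_of_lt_of_le hcl hlow_le) with hc | hc
            · exact hc
            · omega
          have := (PySem.Int.floordiv_lt_iff_lt_mul hK0).mp hfd
          rw [hseg h hlow_le (by omega)]
          nlinarith [mul_comm h K']
        · exact hinv h (by rw [hbndc]; omega) h2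

theorem solution_spec : Claim_equal_solution := by
  intro trees l _ hpre
  unfold Spec_solution solution solution_alt
  cases hmax : PySem.List.max? trees (fun x => x) with
  | none => exact absurd ((PySem.List.max?_eq_none_iff _ _).mp hmax) hpre
  | some m =>
    have hmem : m ∈ trees := PySem.List.max?_mem hmax
    have hmx : ∀ y ∈ trees, y ≤ m := PySem.List.max?_isMax hmax
    show aloop trees l 0 m = if m ≤ 0 ∨ l ≤ 0 then m
      else bloop l (PySem.List.sorted (trees.filter (fun t => decide (0 < t))) (fun x => x) true) 0 0
    by_cases hm : m ≤ 0
    · rw [if_pos (Or.inl hm), aloop, dif_neg (by omega)]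
    · have hm' : 0 < m := by omega
      have hA : CharBS trees l m (aloop trees l 0 m) :=
        aloop_char trees l m _ 0 m rfl (le_refl 0) (by omega) (le_refl m)
          (by omega) (fun h h1 h2 => absurd h2 (not_le.mpr h1))
      by_cases hl : l ≤ 0
      · rw [if_pos (Or.inr hl)]
        refine charBS_unique hA ⟨by omega, le_refl m, ?_, fun h h1 h2 => absurd h2 (not_le.mpr h1)⟩
        intro _
        exact le_trans hl (woodS_nonneg trees m)
      · rw [if_neg (by omega)]
        have hperm : (PySem.List.sorted (trees.filter (fun t => decide (0 < t))) (fun x => x)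
            true).Perm (trees.filter (fun t => decide (0 < t))) :=
          PySem.List.sorted_perm _ _ _
        set full := PySem.List.sorted (trees.filter (fun t => decide (0 < t))) (fun x => x) true
          with hfulldef
        have hsort : full.Pairwise (fun a b => b ≤ a) :=
          PySem.List.sorted_pairwise_rev (trees.filter (fun t => decide (0 < t))) (fun x => x)
        have hmemfull : ∀ x, x ∈ full ↔ x ∈ trees.filter (fun t => decide (0 < t)) :=
          fun x => hperm.mem_iff
        have hpos : ∀ x ∈ full, 0 < x := by
          intro x hx
          have := (hmemfull x).mp hx
          simp at this
          exact this.2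
        have hlef : ∀ x ∈ full, x ≤ m := by
          intro x hx
          have := (hmemfull x).mp hx
          simp at this
          exact hmx x this.1
        have hmfull : m ∈ full := (hmemfull m).mpr (by simp; exact ⟨hmem, hm'⟩)
        have hB : CharBS trees l m (bloop l full 0 0) := by
          have hinv : ∀ h, bndOf full < h → h ≤ m → woodS trees h < l := by
            cases h0 : full with
            | nil => rw [h0] at hmfull; simp at hmfull
            | cons t1 tl =>
              intro h h1 h2
              rw [h0] at hmfull hsort hpos
              simp [bndOf] at h1
              have ht1 : 0 < t1 := hpos t1 (by simp)
              have hall : ∀ x ∈ t1 :: tl, x ≤ h := by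
                intro x hx
                rcases List.mem_cons.mp hx with hx | hx
                · omega
                · have := (List.pairwise_cons.mp hsort).1 x hx
                  omega
              rw [woodS_trees_full hperm h (by omega), h0, woodS_eq_zero _ h hall]
              omega
          have := bloop_char trees l m hm' full hperm hsort hpos hlef full [] (by simp) hinv
          simpa using this
        exact charBS_unique hA hB
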